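-- pv_equiv track=rewrite | github.com/washeed/wumpus-world | main.py | unit_clauses
-- ===== SOURCE A (Python) =====
-- def unit_clauses(expr):
--     to_ret = list()
--     to_ret_cons = True
--     track_truth = (
--         dict()
--     )
--     for d in expr:
--         if len(d) == 1:
--             for t in d:
--                 to_ret.append({t})
--                 if t[0] not in track_truth:
--                     track_truth[t[0]] = t[1]
--                 else:
--                     if t[1] != track_truth[t[0]]:
--                         to_ret_cons = False
--                         break
--
--     return to_ret_cons, to_ret
-- ===== SOURCE B (Python) =====
-- def unit_clauses(expr):
--     lits = [t for d in expr if len(d) == 1 for t in d]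
--     groups = {}
--     for t in lits:
--         groups.setdefault(t[0], set()).add(t[1])
--     cons = all(len(v) == 1 for v in groups.values())
--     return cons, [{t} for t in lits]
-- ===== Notes on version B (the rewrite author's own statement) =====
-- stated objective: simpler
-- what changed: Replaces the first-value-tracking dict with a break-flag scan by a flat literal comprehension plus a grouping dict of value sets, with consistency computed as a terminal all(len==1) over the groups.
import Mathlib
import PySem

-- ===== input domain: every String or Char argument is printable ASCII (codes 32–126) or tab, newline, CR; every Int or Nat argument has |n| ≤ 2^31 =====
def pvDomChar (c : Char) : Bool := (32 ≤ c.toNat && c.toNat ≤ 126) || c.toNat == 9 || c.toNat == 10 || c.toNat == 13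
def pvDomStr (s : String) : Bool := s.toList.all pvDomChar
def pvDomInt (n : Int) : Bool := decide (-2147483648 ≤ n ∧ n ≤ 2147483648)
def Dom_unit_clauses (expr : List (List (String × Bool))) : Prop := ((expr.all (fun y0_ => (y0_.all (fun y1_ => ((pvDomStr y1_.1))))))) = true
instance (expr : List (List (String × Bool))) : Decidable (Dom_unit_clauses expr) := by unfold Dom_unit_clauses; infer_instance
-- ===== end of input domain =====

-- ===== PORT A =====
-- B is a simpler restructuring (flat comprehension + grouping sets); return values proved equal.
-- innerA transliterates A's inner `for t in d` with its `break` (which only exits this inner loop):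
-- state is (to_ret, to_ret_cons, track_truth).
def innerA : List (String × Bool) →
    (List (List (String × Bool)) × Bool × PySem.Dict String Bool) →
    (List (List (String × Bool)) × Bool × PySem.Dict String Bool)
  | [], st => st
  | t :: rest, (ret, cons, td) =>
    let ret' := ret ++ [[t]]
    if ¬ (td.contains t.1) then
      innerA rest (ret', cons, td.insert t.1 t.2)
    else
      if t.2 ≠ td.getD t.1 false then
        (ret', false, td)                 -- break
      else
        innerA rest (ret', cons, td)

def unit_clauses (expr : List (List (String × Bool))) : Bool × (List (List (String × Bool))) :=
  let st := expr.foldl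
    (fun st d => if d.length = 1 then innerA d st else st)
    ([], true, PySem.Dict.empty)
  (st.2.1, st.1)

-- ===== PORT B =====
def stepB (g : PySem.Dict String (PySem.Set Bool)) (t : String × Bool) :
    PySem.Dict String (PySem.Set Bool) :=
  g.insert t.1 (PySem.Set.add (g.getD t.1 PySem.Set.empty) t.2)   -- groups.setdefault(t[0], set()).add(t[1])

def unit_clauses_alt (expr : List (List (String × Bool))) : Bool × (List (List (String × Bool))) :=
  let lits := expr.flatMap (fun d => if d.length = 1 then d else [])
  let groups := lits.foldl stepB PySem.Dict.empty
  let cons := groups.values.all (fun v => PySem.Set.len v == 1)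
  (cons, lits.map (fun t => [t]))

-- ===== PRECONDITION & SPEC =====
def Spec_unit_clauses (expr : List (List (String × Bool))) (out : Bool × (List (List (String × Bool)))) : Prop := out = unit_clauses_alt expr
instance (expr : List (List (String × Bool))) (out : Bool × (List (List (String × Bool)))) : Decidable (Spec_unit_clauses expr out) := by unfold Spec_unit_clauses; infer_instance

-- ===== CLAIM =====
def Claim_equal_unit_clauses : Prop := ∀ (expr : List (List (String × Bool))), Dom_unit_clauses expr → Spec_unit_clauses expr (unit_clauses expr)

-- ===== LEMMAS AND PROOFS =====

-- single-literal step of A's scan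
def stepA (st : List (List (String × Bool)) × Bool × PySem.Dict String Bool)
    (t : String × Bool) :
    List (List (String × Bool)) × Bool × PySem.Dict String Bool :=
  let ret' := st.1 ++ [[t]]
  if ¬ (st.2.2.contains t.1) then
    (ret', st.2.1, st.2.2.insert t.1 t.2)
  else if t.2 ≠ st.2.2.getD t.1 false then
    (ret', false, st.2.2)
  else
    (ret', st.2.1, st.2.2)

def mapHeads (l : List (String × PySem.Set Bool)) : List (String × Bool) :=
  l.map (fun p => (p.1, p.2.headD false))

def allsz1 (g : PySem.Dict String (PySem.Set Bool)) : Bool :=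
  g.values.all (fun v => PySem.Set.len v == 1)

lemma innerA_singleton (t : String × Bool) (st : List (List (String × Bool)) × Bool × PySem.Dict String Bool) :
    innerA [t] st = stepA st t := by
  obtain ⟨ret, cons, td⟩ := st
  rfl

lemma outer_eq_foldl_stepA (expr : List (List (String × Bool)))
    (st : List (List (String × Bool)) × Bool × PySem.Dict String Bool) :
    expr.foldl (fun st d => if d.length = 1 then innerA d st else st) st
      = (expr.flatMap (fun d => if d.length = 1 then d else [])).foldl stepA st := by
  induction expr generalizing st with
  | nil => rfl
  | cons d rest ih =>
    simp only [List.foldl_cons, List.flatMap_cons, List.foldl_append]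
    by_cases h : d.length = 1
    · obtain ⟨t, ht⟩ := List.length_eq_one_iff.mp h
      subst ht
      simp [h, innerA_singleton, ih]
    · simp [h, ih]

lemma get?_mapHeads (l : List (String × PySem.Set Bool)) (k : String) :
    (PySem.Dict.mk (mapHeads l)).get? k
      = ((PySem.Dict.mk l).get? k).map (fun s => s.headD false) := by
  induction l with
  | nil => rfl
  | cons p rest ih =>
    simp only [mapHeads, List.map_cons] at *
    rw [PySem.Dict.get?_mk_cons, PySem.Dict.get?_mk_cons]
    simp only [List.headD_eq_head?_getD] at ih
    by_cases h : (p.1 == k) <;> simp [h, ih]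


lemma mapHeads_append (l₁ l₂ : List (String × PySem.Set Bool)) :
    mapHeads (l₁ ++ l₂) = mapHeads l₁ ++ mapHeads l₂ := by
  simp [mapHeads]

lemma headD_add (s : PySem.Set Bool) (x : Bool) (hs : s ≠ []) :
    (PySem.Set.add s x).headD false = s.headD false := by
  unfold PySem.Set.add
  split_ifs with h
  · rfl
  · cases s with
    | nil => exact absurd rfl hs
    | cons a t => rfl

lemma core_loop (lits : List (String × Bool)) (ret : List (List (String × Bool)))
    (g : PySem.Dict String (PySem.Set Bool))
    (hnd : g.keys.Nodup) (hne : ∀ p ∈ g.items, p.2 ≠ []) :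
    lits.foldl stepA (ret, allsz1 g, PySem.Dict.mk (mapHeads g.items))
      = (ret ++ lits.map (fun t => [t]), allsz1 (lits.foldl stepB g),
         PySem.Dict.mk (mapHeads ((lits.foldl stepB g).items))) := by
  induction lits generalizing ret g with
  | nil => simp
  | cons t rest ih =>
    have hget : (PySem.Dict.mk (mapHeads g.items) : PySem.Dict String Bool).get? t.1
        = (g.get? t.1).map (fun s => s.headD false) := get?_mapHeads g.items t.1
    have hc : (PySem.Dict.mk (mapHeads g.items) : PySem.Dict String Bool).contains t.1
        = g.contains t.1 := by
      rw [PySem.Dict.contains_eq_isSome_get?, PySem.Dict.contains_eq_isSome_get?, hget,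
        Option.isSome_map]
    simp only [List.foldl_cons, List.map_cons]
    cases hB : g.contains t.1 with
    | false =>
      have hgd : g.getD t.1 PySem.Set.empty = PySem.Set.empty :=
        PySem.Dict.getD_of_not_contains g _ hB
      have hitems : (stepB g t).items = g.items ++ [(t.1, [t.2])] := by
        unfold stepB
        rw [PySem.Dict.items_insert_of_not_contains _ _ hB, hgd]
        rfl
      have hstep : stepA (ret, allsz1 g, PySem.Dict.mk (mapHeads g.items)) t
          = (ret ++ [[t]], allsz1 (stepB g t), PySem.Dict.mk (mapHeads (stepB g t).items)) := by
        have h1 : allsz1 (stepB g t) = allsz1 g := by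
          simp [allsz1, PySem.Dict.values, hitems, PySem.Set.len]
        have h2 : (PySem.Dict.mk (mapHeads g.items) : PySem.Dict String Bool).insert t.1 t.2
            = PySem.Dict.mk (mapHeads (stepB g t).items) := by
          apply PySem.Dict.ext
          rw [PySem.Dict.items_insert_of_not_contains _ _ (by rw [hc]; exact hB)]
          rw [hitems, mapHeads_append]
          rfl
        simp [stepA, hc, hB, h1, h2]
      rw [hstep, ih (ret ++ [[t]]) (stepB g t)
        (PySem.Dict.nodup_keys_insert _ _ _ hnd)
        (by intro p hp
            rw [hitems] at hp
            rcases List.mem_append.mp hp with h | h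
            · exact hne p h
            · simp at h; subst h; simp)]
      simp
    | true =>
      have hsome : (g.get? t.1).isSome := by
        rw [← PySem.Dict.contains_eq_isSome_get?]; exact hB
      obtain ⟨s, hs⟩ := Option.isSome_iff_exists.mp hsome
      have hmem : (t.1, s) ∈ g.items := PySem.Dict.mem_items_of_get?_eq_some g hs
      have hsne : s ≠ [] := hne _ hmem
      have hgd : g.getD t.1 PySem.Set.empty = s := PySem.Dict.getD_of_get?_eq_some g _ hs
      have hmgd : (PySem.Dict.mk (mapHeads g.items) : PySem.Dict String Bool).getD t.1 false
          = s.headD false := by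
        rw [PySem.Dict.getD_eq_get?_getD, hget, hs]; rfl
      have huniq : ∀ p ∈ g.items, p.1 = t.1 → p.2 = s := by
        intro p hp hp1
        have : g.get? t.1 = some p.2 :=
          (PySem.Dict.get?_eq_some_iff_mem_items g t.1 p.2 hnd).mpr (by rw [← hp1]; exact hp)
        rw [hs] at this; exact (Option.some_inj.mp this).symm
      by_cases hv : t.2 = s.headD false
      · -- same truth value: A's dict and state untouched, B's group set absorbs the duplicate
        have hadd : PySem.Set.add s t.2 = s := by
          cases s with
          | nil => exact absurd rfl hsne
          | cons a tl =>
            simp only [List.headD_cons] at hv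
            simp [PySem.Set.add, PySem.Set.contains, hv]
        have hg' : stepB g t = g := by
          unfold stepB
          rw [hgd, hadd]
          apply PySem.Dict.ext
          rw [PySem.Dict.items_insert_of_contains _ _ hB]
          conv_rhs => rw [← List.map_id g.items]
          apply List.map_congr_left
          intro p hp
          by_cases h1 : p.1 = t.1
          · simp only [h1, beq_self_eq_true, if_true]
            rw [← huniq p hp h1, ← h1, id]
          · simp [h1]
        have hstep : stepA (ret, allsz1 g, PySem.Dict.mk (mapHeads g.items)) t
            = (ret ++ [[t]], allsz1 g, PySem.Dict.mk (mapHeads g.items)) := by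
          simp [stepA, hc, hB, hmgd, hv]
        rw [hstep, hg', ih (ret ++ [[t]]) g hnd hne]
        simp
      · -- conflicting truth value: A latches False; B's group set at t.1 now has ≥ 2 elements
        have haddne : PySem.Set.add s t.2 ≠ [] := by
          unfold PySem.Set.add
          split_ifs
          · exact hsne
          · simp
        have hlen : ((PySem.Set.len (PySem.Set.add s t.2)) == 1) = false := by
          cases s with
          | nil => exact absurd rfl hsne
          | cons a tl =>
            simp only [List.headD_cons] at hv
            unfold PySem.Set.add PySem.Set.len
            split_ifs with h
            · have : t.2 ∈ tl := by
                rcases List.mem_cons.mp (List.contains_iff_mem.mp h) with h' | h'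
                · exact absurd h' hv
                · exact h'
              cases tl with
              | nil => simp at this
              | cons b tl2 => simp; omega
            · simp; omega
        have hitems' : (stepB g t).items
            = g.items.map (fun p => if p.1 == t.1 then (t.1, PySem.Set.add s t.2) else p) := by
          unfold stepB
          rw [hgd, PySem.Dict.items_insert_of_contains _ _ hB]
        have hmh : PySem.Dict.mk (mapHeads (stepB g t).items)
            = (PySem.Dict.mk (mapHeads g.items) : PySem.Dict String Bool) := by
          apply PySem.Dict.ext
          show mapHeads (stepB g t).items = mapHeads g.items
          rw [hitems']
          unfold mapHeads
          rw [List.map_map]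
          apply List.map_congr_left
          intro p hp
          by_cases h1 : p.1 = t.1
          · simp only [Function.comp, h1, beq_self_eq_true, if_true]
            rw [huniq p hp h1, headD_add s t.2 hsne]
          · simp [Function.comp, h1]
        have hall' : allsz1 (stepB g t) = false := by
          have hmem' : (t.1, PySem.Set.add s t.2) ∈ (stepB g t).items := by
            unfold stepB
            rw [hgd]
            exact PySem.Dict.mem_items_insert_self g t.1 (PySem.Set.add s t.2)
          unfold allsz1
          rw [List.all_eq_false]
          refine ⟨PySem.Set.add s t.2, ?_, by rw [hlen]; simp⟩
          simp only [PySem.Dict.values]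
          exact List.mem_map.mpr ⟨_, hmem', rfl⟩
        have hstep : stepA (ret, allsz1 g, PySem.Dict.mk (mapHeads g.items)) t
            = (ret ++ [[t]], allsz1 (stepB g t), PySem.Dict.mk (mapHeads (stepB g t).items)) := by
          rw [hall', hmh]
          simp only [List.headD_eq_head?_getD] at hv hmgd
          simp [stepA, hc, hB, hmgd, hv]
        rw [hstep, ih (ret ++ [[t]]) (stepB g t)
          (PySem.Dict.nodup_keys_insert _ _ _ hnd)
          (by intro p hp
              rcases (PySem.Dict.mem_items_insert _ _ _ _).mp (by unfold stepB at hp; rw [hgd] at hp; exact hp) with h | h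
              · rw [h]; exact haddne
              · exact hne p h.1)]
        simp



theorem unit_clauses_spec : Claim_equal_unit_clauses := by
  intro expr _
  unfold Spec_unit_clauses unit_clauses unit_clauses_alt
  rw [outer_eq_foldl_stepA]
  have h2 : (List.flatMap (fun d => if d.length = 1 then d else []) expr).foldl stepA
      ([], true, (PySem.Dict.empty : PySem.Dict String Bool))
      = ([] ++ (expr.flatMap (fun d => if d.length = 1 then d else [])).map (fun t => [t]),
         allsz1 ((expr.flatMap (fun d => if d.length = 1 then d else [])).foldl stepB PySem.Dict.empty),
         PySem.Dict.mk (mapHeads (((expr.flatMap (fun d => if d.length = 1 then d else [])).foldl stepB PySem.Dict.empty).items))) :=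
    core_loop _ [] PySem.Dict.empty (by simp [PySem.Dict.empty, PySem.Dict.keys]) (by simp [PySem.Dict.empty])
  rw [h2]
  rfl
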